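-- pv_equiv track=rewrite | github.com/PRKKILLER/Algorithm_Practice | Company-OA/google/Maxium occuring elements.py | maxEqual
-- ===== SOURCE A (Python) =====
-- from collections import deque
--
-- def maxEqual(arr, K):
--     dq = deque()
--     window = 0 # record window size
--     start = 0 # recard sliding window's start pointer
--     s = 0 # record the sum of the sliding window
--
--     for i, n in enumerate(arr):
--         while dq and arr[dq[-1]] <= n:
--             dq.pop()
--
--         dq.append(i)
--         s += n # sum of the sliding window
--
--         cost = arr[dq[0]] * (window + 1) - s # total number of opr to make the window same
--
--         if cost <= K:
--             window += 1
--         else: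
--             # move the start pointer of the sliding window
--             while dq[0] <= start:
--                 dq.popleft()
--
--             # move the start pointer and remove its weight from the sum
--             s -= arr[start]
--             start += 1
--
--     return window
-- ===== SOURCE B (Python) =====
-- from collections import deque
--
-- def maxEqual(arr, K):
--     # shrinking two-pointer sliding window; best = max feasible window length
--     dq = deque()  # indices of window suffix maxima, front = window max
--     best = 0
--     left = 0
--     s = 0
--     for i, x in enumerate(arr):
--         while dq and arr[dq[-1]] <= x:
--             dq.pop()
--         dq.append(i)
--         s += x
--         while left <= i and arr[dq[0]] * (i - left + 1) - s > K:
--             if dq[0] == left: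
--                 dq.popleft()
--             s -= arr[left]
--             left += 1
--         if i - left + 1 > best:
--             best = i - left + 1
--     return best
-- ===== Notes on version B (the rewrite author's own statement) =====
-- stated objective: alternative
-- what changed: Replaces A's non-shrinking window (a best-so-far-sized window that either grows or slides right by one, with stale deque fronts cleaned only lazily) by the classic shrinking two-pointer window that restores feasibility eagerly after every right extension and returns the maximum window length seen.
import Mathlib
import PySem

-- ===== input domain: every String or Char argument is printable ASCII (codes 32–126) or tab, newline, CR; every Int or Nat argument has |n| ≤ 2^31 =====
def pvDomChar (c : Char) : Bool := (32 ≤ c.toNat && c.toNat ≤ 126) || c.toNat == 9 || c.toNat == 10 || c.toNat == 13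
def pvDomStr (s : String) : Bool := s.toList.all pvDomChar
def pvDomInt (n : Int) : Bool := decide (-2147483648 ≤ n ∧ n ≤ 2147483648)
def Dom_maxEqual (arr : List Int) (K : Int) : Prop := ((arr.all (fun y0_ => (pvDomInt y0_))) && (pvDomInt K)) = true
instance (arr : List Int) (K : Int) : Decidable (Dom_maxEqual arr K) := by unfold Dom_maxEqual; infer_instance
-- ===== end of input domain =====

-- B replaces A's non-shrinking window (a best-so-far-sized window that grows or slides
-- right by one, cleaning stale deque fronts lazily) by the classic shrinking two-pointer
-- window that eagerly restores feasibility after each right extension and takes the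
-- maximum window length seen; same O(n) cost, alternative algorithm (not claimed faster).

-- ===== PORT A =====
structure PvStA where
  dq : List Nat
  window : Nat
  start : Nat
  s : Int

-- the identical Python back-pop + append lines of both versions:
-- `while dq and arr[dq[-1]] <= x: dq.pop()` followed by `dq.append(i)`
def pvPush (arr : List Int) (x : Int) (i : Nat) (dq : List Nat) : List Nat :=
  (dq.reverse.dropWhile (fun j => decide (arr.getD j 0 ≤ x))).reverse ++ [i]

def pvStepA (arr : List Int) (K : Int) (i : Nat) (x : Int) (st : PvStA) : PvStA :=
  let dq1 := pvPush arr x i st.dq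
  let s1 := st.s + x
  let cost := arr.getD (dq1.headD 0) 0 * ((st.window : Int) + 1) - s1
  if cost ≤ K then
    { dq := dq1, window := st.window + 1, start := st.start, s := s1 }
  else
    -- `while dq[0] <= start: dq.popleft()`; where Python would raise IndexError on an
    -- emptied deque (only reachable for K < 0, outside Pre_) this dropWhile returns []
    { dq := dq1.dropWhile (fun j => decide (j ≤ st.start)), window := st.window,
      start := st.start + 1, s := s1 - arr.getD st.start 0 }

def pvLoopA (arr : List Int) (K : Int) : List Int → Nat → PvStA → PvStA
  | [], _, st => st
  | x :: rest, i, st => pvLoopA arr K rest (i + 1) (pvStepA arr K i x st)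

def maxEqual (arr : List Int) (K : Int) : Int :=
  ((pvLoopA arr K arr 0 ⟨[], 0, 0, 0⟩).window : Int)

-- ===== PORT B =====
structure PvStB where
  dq : List Nat
  best : Nat
  left : Nat
  s : Int

-- `while left <= i and arr[dq[0]]*(i-left+1)-s > K: (popleft if dq[0]==left); s -= arr[left]; left += 1`
-- fuel = i+1-left bounds the loop exactly (left grows by 1 per pass and stops at i+1)
def pvShrinkB (arr : List Int) (K : Int) (i : Nat) : Nat → List Nat → Nat → Int → List Nat × Nat × Int
  | 0, dq, left, s => (dq, left, s)
  | fuel + 1, dq, left, s =>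
    if left ≤ i ∧ K < arr.getD (dq.headD 0) 0 * ((i : Int) - (left : Int) + 1) - s then
      pvShrinkB arr K i fuel (if dq.headD 0 = left then dq.tail else dq) (left + 1)
        (s - arr.getD left 0)
    else (dq, left, s)

def pvStepB (arr : List Int) (K : Int) (i : Nat) (x : Int) (st : PvStB) : PvStB :=
  let dq1 := pvPush arr x i st.dq
  let s1 := st.s + x
  let r := pvShrinkB arr K i (i + 1 - st.left) dq1 st.left s1
  { dq := r.1, best := max st.best (i + 1 - r.2.1), left := r.2.1, s := r.2.2 }

def pvLoopB (arr : List Int) (K : Int) : List Int → Nat → PvStB → PvStB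
  | [], _, st => st
  | x :: rest, i, st => pvLoopB arr K rest (i + 1) (pvStepB arr K i x st)

def maxEqual_alt (arr : List Int) (K : Int) : Int :=
  ((pvLoopB arr K arr 0 ⟨[], 0, 0, 0⟩).best : Int)

-- ===== PRECONDITION & SPEC =====
-- Pre_ excludes exactly the inputs on which A raises: for every non-empty arr with
-- K < 0 A pops its deque empty and the next `dq[0]` raises IndexError.
def Pre_maxEqual (arr : List Int) (K : Int) : Prop := arr = [] ∨ 0 ≤ K
instance (arr : List Int) (K : Int) : Decidable (Pre_maxEqual arr K) := by
  unfold Pre_maxEqual; infer_instance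

def pvWitness_maxEqual : List Int × Int := ([1, 3, 1, 2], 2)

def Spec_maxEqual (arr : List Int) (K : Int) (out : Int) : Prop := out = maxEqual_alt arr K
instance (arr : List Int) (K : Int) (out : Int) : Decidable (Spec_maxEqual arr K out) := by
  unfold Spec_maxEqual; infer_instance

-- ===== CLAIM (what is proved, stated in full; the proofs are below) =====
def Claim_equal_maxEqual : Prop := ∀ (arr : List Int) (K : Int), Dom_maxEqual arr K →
  Pre_maxEqual arr K → Spec_maxEqual arr K (maxEqual arr K)

-- ===== LEMMAS AND PROOFS =====

-- value of arr at j, sum and max of arr over the index window [a, b)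
def pvSum (arr : List Int) (a b : Nat) : Int :=
  ((List.range' a (b - a)).map (fun j => arr.getD j 0)).sum
def pvMax (arr : List Int) (a b : Nat) : Int :=
  ((List.range' a (b - a)).map (fun j => arr.getD j 0)).foldl max (arr.getD a 0)
-- cost to equalize window [a, i]
def pvCost (arr : List Int) (a i : Nat) : Int :=
  pvMax arr a (i + 1) * ((i : Int) + 1 - (a : Int)) - pvSum arr a (i + 1)
-- the common reference counter: after m steps, the value both loops carry
def pvRefc (arr : List Int) (K : Int) : Nat → Nat
  | 0 => 0
  | m + 1 => if pvCost arr (m - pvRefc arr K m) m ≤ K then pvRefc arr K m + 1 else pvRefc arr K m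

-- monotone-deque invariant for window [a, b)
def pvDqInv (arr : List Int) (a b : Nat) (dq : List Nat) : Prop :=
  dq.Pairwise (· < ·) ∧ (∀ j ∈ dq, a ≤ j ∧ j < b) ∧
  (∀ j, a ≤ j → j < b → ∃ d ∈ dq, j ≤ d ∧ arr.getD j 0 ≤ arr.getD d 0) ∧
  dq.Pairwise (fun p q => arr.getD q 0 ≤ arr.getD p 0)


theorem pvRange_concat {a b : Nat} (h : a ≤ b) :
    List.range' a (b + 1 - a) = List.range' a (b - a) ++ [b] := by
  have h1 : b + 1 - a = (b - a) + 1 := by omega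
  rw [h1]
  simpa [Nat.one_mul, Nat.add_sub_cancel' h] using
    List.range'_concat (s := a) (n := b - a) (step := 1)

theorem pvSum_right (arr : List Int) {a b : Nat} (h : a ≤ b) :
    pvSum arr a (b + 1) = pvSum arr a b + arr.getD b 0 := by
  unfold pvSum
  rw [pvRange_concat h]
  simp

theorem pvSum_left (arr : List Int) {a b : Nat} (h : a < b) :
    pvSum arr a b = arr.getD a 0 + pvSum arr (a + 1) b := by
  unfold pvSum
  have h1 : b - a = (b - (a + 1)) + 1 := by omega
  rw [h1, List.range'_succ]
  simp

theorem pvMax_right (arr : List Int) {a b : Nat} (h : a ≤ b) :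
    pvMax arr a (b + 1) = max (pvMax arr a b) (arr.getD b 0) := by
  unfold pvMax
  rw [pvRange_concat h]
  simp

theorem pvMax_self (arr : List Int) (a : Nat) : pvMax arr a a = arr.getD a 0 := by
  unfold pvMax
  simp

theorem pvLe_max (arr : List Int) {a j b : Nat} (h1 : a ≤ j) (h2 : j < b) :
    arr.getD j 0 ≤ pvMax arr a b := by
  induction b, h2 using Nat.le_induction with
  | base => rw [pvMax_right arr h1]; exact le_max_right _ _
  | succ b hb ih =>
    rw [pvMax_right arr (le_trans h1 (by omega))]
    exact le_trans ih (le_max_left _ _)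

theorem pvMax_le (arr : List Int) {a b : Nat} {c : Int} (h : a < b)
    (hb : ∀ j, a ≤ j → j < b → arr.getD j 0 ≤ c) : pvMax arr a b ≤ c := by
  induction b, h using Nat.le_induction with
  | base =>
    have : pvMax arr a (a + 1) ≤ c := by
      rw [pvMax_right arr (le_refl a), pvMax_self]
      simpa using hb a (le_refl a) (by omega)
    simpa [Nat.succ_eq_add_one] using this
  | succ b hab ih =>
    rw [pvMax_right arr (by omega)]
    exact max_le (ih (fun j hj1 hj2 => hb j hj1 (by omega))) (hb b (by omega) (by omega))

theorem pvSum_zero (arr : List Int) (a : Nat) : pvSum arr a a = 0 := by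
  unfold pvSum; simp

theorem pvSum_split (arr : List Int) {a c b : Nat} (h1 : a ≤ c) (h2 : c ≤ b) :
    pvSum arr a b = pvSum arr a c + pvSum arr c b := by
  induction b, h2 using Nat.le_induction with
  | base => rw [pvSum_zero]; ring
  | succ b hcb ih =>
    rw [pvSum_right arr (le_trans h1 hcb), pvSum_right arr hcb, ih]
    ring

theorem pvSum_le_mul (arr : List Int) {a a' : Nat} {M : Int} (h : a ≤ a')
    (hb : ∀ j, a ≤ j → j < a' → arr.getD j 0 ≤ M) :
    pvSum arr a a' ≤ M * ((a' : Int) - (a : Int)) := by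
  induction a', h using Nat.le_induction with
  | base => rw [pvSum_zero]; simp
  | succ a' ha ih =>
    rw [pvSum_right arr ha]
    have h1 := ih (fun j hj1 hj2 => hb j hj1 (by omega))
    have h2 := hb a' ha (by omega)
    push_cast
    nlinarith

theorem pvCost_mono_left (arr : List Int) {a a' i : Nat} (h1 : a ≤ a') (h2 : a' ≤ i) :
    pvCost arr a' i ≤ pvCost arr a i := by
  unfold pvCost
  have hM : pvMax arr a' (i + 1) ≤ pvMax arr a (i + 1) :=
    pvMax_le arr (by omega) (fun j hj1 hj2 => pvLe_max arr (le_trans h1 hj1) hj2)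
  have hsplit : pvSum arr a (i + 1) = pvSum arr a a' + pvSum arr a' (i + 1) :=
    pvSum_split arr h1 (by omega)
  have hsum : pvSum arr a a' ≤ pvMax arr a (i + 1) * ((a' : Int) - (a : Int)) :=
    pvSum_le_mul arr h1 (fun j hj1 hj2 => pvLe_max arr hj1 (by omega))
  have hL : (0 : Int) ≤ (i : Int) + 1 - (a' : Int) := by
    have : (a' : Int) ≤ (i : Int) := by exact_mod_cast h2
    linarith
  nlinarith [mul_le_mul_of_nonneg_right hM hL]

theorem pvCost_mono_right (arr : List Int) {a i : Nat} (h : a ≤ i) :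
    pvCost arr a i ≤ pvCost arr a (i + 1) := by
  unfold pvCost
  rw [pvMax_right arr (by omega : a ≤ i + 1), pvSum_right arr (by omega : a ≤ i + 1)]
  have hL : (0 : Int) ≤ (i : Int) + 1 - (a : Int) := by
    have : (a : Int) ≤ (i : Int) := by exact_mod_cast h
    linarith
  rcases le_total (arr.getD (i + 1) 0) (pvMax arr a (i + 1)) with hc | hc
  · rw [max_eq_left hc]
    push_cast
    nlinarith
  · rw [max_eq_right hc]
    push_cast
    nlinarith

theorem pvCost_self (arr : List Int) (i : Nat) : pvCost arr i i = 0 := by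
  unfold pvCost
  rw [pvMax_right arr (le_refl i), pvSum_right arr (le_refl i), pvMax_self, pvSum_zero]
  simp

theorem pvRefc_le (arr : List Int) (K : Int) (m : Nat) : pvRefc arr K m ≤ m := by
  induction m with
  | zero => simp [pvRefc]
  | succ m ih => rw [pvRefc]; split <;> omega

theorem pvRefc_mono (arr : List Int) (K : Int) (m : Nat) :
    pvRefc arr K m ≤ pvRefc arr K (m + 1) := by
  rw [pvRefc]; split <;> omega

theorem pvRefc_bound (arr : List Int) (K : Int) :
    ∀ m i a, i < m → a ≤ i → pvCost arr a i ≤ K → i + 1 - a ≤ pvRefc arr K m := by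
  intro m
  induction m with
  | zero => intro i a hi; omega
  | succ m ih =>
    intro i a hi ha hc
    by_cases him : i < m
    · exact le_trans (ih i a him ha hc) (pvRefc_mono arr K m)
    · have hieq : i = m := by omega
      subst hieq
      have hcle : pvRefc arr K i ≤ i := pvRefc_le arr K i
      by_cases hcm : pvCost arr (i - pvRefc arr K i) i ≤ K
      · have hr : pvRefc arr K (i + 1) = pvRefc arr K i + 1 := by
          rw [pvRefc]; simp [hcm]
        rw [hr]
        by_cases haeq : a = i
        · omega
        · have halt : a < i := by omega
          have h2 : pvCost arr a (i - 1) ≤ K := by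
            have := pvCost_mono_right arr (a := a) (i := i - 1) (by omega)
            rw [show i - 1 + 1 = i by omega] at this
            linarith
          have := ih (i - 1) a (by omega) (by omega) h2
          omega
      · have hr : pvRefc arr K (i + 1) = pvRefc arr K i := by
          rw [pvRefc]; simp [hcm]
        rw [hr]
        have hagt : ¬ a ≤ i - pvRefc arr K i := by
          intro hle
          exact hcm (le_trans (pvCost_mono_left arr hle (by omega)) hc)
        omega


theorem pvDropWhile_head {α : Type} (p : α → Bool) :
    ∀ (l : List α) (h0 : α) (t0 : List α), l.dropWhile p = h0 :: t0 → p h0 = false := by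
  intro l
  induction l with
  | nil => intro h0 t0 h; simp [List.dropWhile] at h
  | cons a l ih =>
    intro h0 t0 h
    rw [List.dropWhile_cons] at h
    split at h
    · exact ih h0 t0 h
    · cases h
      next hpa => exact Bool.eq_false_iff.mpr hpa

theorem pvDqInv_push (arr : List Int) {a b : Nat} {dq : List Nat}
    (h : pvDqInv arr a b dq) (hab : a ≤ b) :
    pvDqInv arr a (b + 1) (pvPush arr (arr.getD b 0) b dq) := by
  obtain ⟨h1, h2, h3, h4⟩ := h
  have hres : pvPush arr (arr.getD b 0) b dq =
      (dq.reverse.dropWhile (fun j => decide (arr.getD j 0 ≤ arr.getD b 0))).reverse ++ [b] := rfl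
  have hsub : (dq.reverse.dropWhile (fun j => decide (arr.getD j 0 ≤ arr.getD b 0))).reverse.Sublist dq := by
    have hs1 := List.dropWhile_sublist (l := dq.reverse) (p := fun j => decide (arr.getD j 0 ≤ arr.getD b 0))
    simpa using hs1.reverse
  have hdq_eq : dq =
      (dq.reverse.dropWhile (fun j => decide (arr.getD j 0 ≤ arr.getD b 0))).reverse ++
      (dq.reverse.takeWhile (fun j => decide (arr.getD j 0 ≤ arr.getD b 0))).reverse := by
    conv_lhs => rw [← List.reverse_reverse dq,
      ← List.takeWhile_append_dropWhile (p := fun j => decide (arr.getD j 0 ≤ arr.getD b 0)) (l := dq.reverse)]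
    rw [List.reverse_append]
  have hT : ∀ t ∈ (dq.reverse.takeWhile (fun j => decide (arr.getD j 0 ≤ arr.getD b 0))).reverse,
      arr.getD t 0 ≤ arr.getD b 0 := by
    intro t ht
    rw [List.mem_reverse] at ht
    have := List.mem_takeWhile_imp ht
    exact of_decide_eq_true this
  have hSgt : ∀ s ∈ (dq.reverse.dropWhile (fun j => decide (arr.getD j 0 ≤ arr.getD b 0))).reverse,
      arr.getD b 0 < arr.getD s 0 := by
    have hpw : (dq.reverse.dropWhile (fun j => decide (arr.getD j 0 ≤ arr.getD b 0))).Pairwise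
        (fun u v => arr.getD u 0 ≤ arr.getD v 0) := by
      have hrev : dq.reverse.Pairwise (fun u v => arr.getD u 0 ≤ arr.getD v 0) := by
        rw [List.pairwise_reverse]; exact h4
      exact hrev.sublist (List.dropWhile_sublist _)
    intro s hs
    rw [List.mem_reverse] at hs
    rcases hrl : dq.reverse.dropWhile (fun j => decide (arr.getD j 0 ≤ arr.getD b 0)) with _ | ⟨h0, t0⟩
    · rw [hrl] at hs; simp at hs
    · rw [hrl] at hs hpw
      have hph0 := pvDropWhile_head _ dq.reverse h0 t0 hrl
      have hx0 : arr.getD b 0 < arr.getD h0 0 := by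
        have := of_decide_eq_false hph0
        omega
      rcases List.mem_cons.mp hs with hs | hs
      · rw [hs]; exact hx0
      · exact lt_of_lt_of_le hx0 ((List.pairwise_cons.mp hpw).1 s hs)
  rw [hres]
  refine ⟨?_, ?_, ?_, ?_⟩
  · rw [List.pairwise_append]
    exact ⟨h1.sublist hsub, List.pairwise_singleton _ _,
      fun s hs q hq => by
        rw [List.mem_singleton] at hq
        rw [hq]
        exact (h2 s (hsub.mem hs)).2⟩
  · intro j hj
    rcases List.mem_append.mp hj with hj | hj
    · have := h2 j (hsub.mem hj); omega
    · rw [List.mem_singleton] at hj; omega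
  · intro j hj1 hj2
    by_cases hjb : j = b
    · exact ⟨b, by simp, by omega, by rw [hjb]⟩
    · have hjlt : j < b := by omega
      obtain ⟨d, hd, hjd, hvd⟩ := h3 j hj1 hjlt
      rw [hdq_eq] at hd
      rcases List.mem_append.mp hd with hd | hd
      · exact ⟨d, List.mem_append.mpr (Or.inl hd), hjd, hvd⟩
      · exact ⟨b, by simp, by omega, le_trans hvd (hT d hd)⟩
  · rw [List.pairwise_append]
    exact ⟨h4.sublist hsub, List.pairwise_singleton _ _,
      fun s hs q hq => by
        rw [List.mem_singleton] at hq
        rw [hq]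
        exact le_of_lt (hSgt s hs)⟩

theorem pvDqInv_dropFront (arr : List Int) {a b : Nat} {dq : List Nat}
    (h : pvDqInv arr a b dq) :
    pvDqInv arr (a + 1) b (dq.dropWhile (fun j => decide (j ≤ a))) := by
  obtain ⟨h1, h2, h3, h4⟩ := h
  have hsub : (dq.dropWhile (fun j => decide (j ≤ a))).Sublist dq := List.dropWhile_sublist _
  refine ⟨h1.sublist hsub, ?_, ?_, h4.sublist hsub⟩
  · intro j hj
    refine ⟨?_, (h2 j (hsub.mem hj)).2⟩
    have hpw : (dq.dropWhile (fun j => decide (j ≤ a))).Pairwise (· < ·) := h1.sublist hsub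
    rcases hR : dq.dropWhile (fun j => decide (j ≤ a)) with _ | ⟨h0, t0⟩
    · rw [hR] at hj; simp at hj
    · rw [hR] at hj hpw
      have hph0 := pvDropWhile_head _ dq h0 t0 hR
      have ha0 : a < h0 := by
        have := of_decide_eq_false hph0
        omega
      rcases List.mem_cons.mp hj with hj | hj
      · omega
      · have := (List.pairwise_cons.mp hpw).1 j hj; omega
  · intro j hj1 hj2
    obtain ⟨d, hd, hjd, hvd⟩ := h3 j (by omega) hj2
    have hd2 : d ∈ dq.takeWhile (fun j => decide (j ≤ a)) ++ dq.dropWhile (fun j => decide (j ≤ a)) := by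
      rw [List.takeWhile_append_dropWhile]; exact hd
    rcases List.mem_append.mp hd2 with hd' | hd'
    · have hpd := List.mem_takeWhile_imp hd'
      simp only [decide_eq_true_eq] at hpd
      omega
    · exact ⟨d, hd', hjd, hvd⟩

theorem pvDqInv_dropOne (arr : List Int) {a b : Nat} {dq : List Nat}
    (h : pvDqInv arr a b dq) :
    pvDqInv arr (a + 1) b (if dq.headD 0 = a then dq.tail else dq) := by
  obtain ⟨h1, h2, h3, h4⟩ := h
  match dq with
  | [] =>
    refine ⟨by split <;> simp, by split <;> simp, ?_, by split <;> simp⟩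
    intro j hj1 hj2
    obtain ⟨d, hd, _⟩ := h3 j (by omega) hj2
    simp at hd
  | h0 :: t0 =>
    by_cases h0a : h0 = a
    · rw [List.headD_cons, if_pos h0a, List.tail_cons]
      refine ⟨(List.pairwise_cons.mp h1).2, ?_, ?_, (List.pairwise_cons.mp h4).2⟩
      · intro j hj
        have := (List.pairwise_cons.mp h1).1 j hj
        have := h2 j (List.mem_cons_of_mem _ hj)
        omega
      · intro j hj1 hj2
        obtain ⟨d, hd, hjd, hvd⟩ := h3 j (by omega) hj2
        rcases List.mem_cons.mp hd with hd | hd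
        · omega
        · exact ⟨d, hd, hjd, hvd⟩
    · rw [List.headD_cons, if_neg h0a]
      refine ⟨h1, ?_, ?_, h4⟩
      · intro j hj
        have hb0 := h2 h0 List.mem_cons_self
        rcases List.mem_cons.mp hj with hj | hj
        · have := h2 j (by rw [hj]; exact List.mem_cons_self); omega
        · have := (List.pairwise_cons.mp h1).1 j hj
          have := h2 j (List.mem_cons_of_mem _ hj)
          omega
      · intro j hj1 hj2
        obtain ⟨d, hd, hjd, hvd⟩ := h3 j (by omega) hj2
        exact ⟨d, hd, hjd, hvd⟩

theorem pvHead_max (arr : List Int) {a b : Nat} {dq : List Nat}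
    (h : pvDqInv arr a b dq) (hab : a < b) :
    arr.getD (dq.headD 0) 0 = pvMax arr a b := by
  obtain ⟨h1, h2, h3, h4⟩ := h
  obtain ⟨d, hd, _, _⟩ := h3 a (le_refl a) hab
  match dq with
  | [] => simp at hd
  | d0 :: t0 =>
    rw [List.headD_cons]
    have hb0 := h2 d0 List.mem_cons_self
    refine le_antisymm (pvLe_max arr hb0.1 hb0.2) (pvMax_le arr hab ?_)
    intro j hj1 hj2
    obtain ⟨e, he, _, hve⟩ := h3 j hj1 hj2
    rcases List.mem_cons.mp he with he | he
    · rw [he] at hve; exact hve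
    · exact le_trans hve ((List.pairwise_cons.mp h4).1 e he)

def pvInvA (arr : List Int) (K : Int) (m : Nat) (st : PvStA) : Prop :=
  st.window = pvRefc arr K m ∧ st.start = m - pvRefc arr K m ∧
  st.s = pvSum arr st.start m ∧ pvDqInv arr st.start m st.dq

def pvInvB (arr : List Int) (K : Int) (m : Nat) (st : PvStB) : Prop :=
  st.best = pvRefc arr K m ∧ st.left ≤ m ∧ st.s = pvSum arr st.left m ∧
  pvDqInv arr st.left m st.dq ∧ ∀ a, a < st.left → ¬ (pvCost arr a (m - 1) ≤ K)

theorem pvStepA_inv (arr : List Int) (K : Int) (hK : 0 ≤ K) {m : Nat} {x : Int} {st : PvStA}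
    (hx : x = arr.getD m 0) (h : pvInvA arr K m st) :
    pvInvA arr K (m + 1) (pvStepA arr K m x st) := by
  subst hx
  obtain ⟨hw, hst, hs, hdq⟩ := h
  have hcle : pvRefc arr K m ≤ m := pvRefc_le arr K m
  have hstart_le : st.start ≤ m := by omega
  have hdq1 : pvDqInv arr st.start (m + 1) (pvPush arr (arr.getD m 0) m st.dq) :=
    pvDqInv_push arr hdq hstart_le
  have hhead : arr.getD ((pvPush arr (arr.getD m 0) m st.dq).headD 0) 0 =
      pvMax arr st.start (m + 1) := pvHead_max arr hdq1 (by omega)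
  have hcast : ((st.start : Nat) : Int) = (m : Int) - (pvRefc arr K m : Int) := by omega
  have hcost : arr.getD ((pvPush arr (arr.getD m 0) m st.dq).headD 0) 0 *
      ((st.window : Int) + 1) - (st.s + arr.getD m 0) = pvCost arr st.start m := by
    rw [hhead, hs, hw, pvCost, pvSum_right arr hstart_le, hcast]
    ring
  unfold pvStepA
  simp only []
  split
  · next hif =>
    rw [hcost] at hif
    have hrefc : pvRefc arr K (m + 1) = pvRefc arr K m + 1 := by
      rw [pvRefc, ← hst, if_pos hif]
    refine ⟨?_, ?_, ?_, hdq1⟩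
    · simp only []; omega
    · simp only []; omega
    · simp only [hs, pvSum_right arr hstart_le]
  · next hif =>
    rw [hcost] at hif
    have hrefc : pvRefc arr K (m + 1) = pvRefc arr K m := by
      rw [pvRefc, ← hst, if_neg hif]
    have hc1 : 1 ≤ pvRefc arr K m := by
      by_contra hc0
      have hst' : st.start = m := by omega
      rw [hst', pvCost_self arr m] at hif
      exact hif hK
    refine ⟨?_, ?_, ?_, ?_⟩
    · simp only []; omega
    · simp only []; omega
    · simp only []
      have e1 : pvSum arr st.start (m + 1) = pvSum arr st.start m + arr.getD m 0 :=
        pvSum_right arr hstart_le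
      have e2 : pvSum arr st.start (m + 1) =
          arr.getD st.start 0 + pvSum arr (st.start + 1) (m + 1) :=
        pvSum_left arr (by omega)
      rw [hs]; linarith
    · exact pvDqInv_dropFront arr hdq1

theorem pvShrink_spec (arr : List Int) (K : Int) (hK : 0 ≤ K) (i : Nat) :
    ∀ fuel dq left s, fuel + left = i + 1 → pvDqInv arr left (i + 1) dq →
    s = pvSum arr left (i + 1) → (∀ a, a < left → ¬ (pvCost arr a i ≤ K)) →
    pvDqInv arr (pvShrinkB arr K i fuel dq left s).2.1 (i + 1) (pvShrinkB arr K i fuel dq left s).1 ∧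
    (pvShrinkB arr K i fuel dq left s).2.2 = pvSum arr (pvShrinkB arr K i fuel dq left s).2.1 (i + 1) ∧
    (∀ a, a < (pvShrinkB arr K i fuel dq left s).2.1 → ¬ (pvCost arr a i ≤ K)) ∧
    pvCost arr (pvShrinkB arr K i fuel dq left s).2.1 i ≤ K ∧
    (pvShrinkB arr K i fuel dq left s).2.1 ≤ i := by
  intro fuel
  induction fuel with
  | zero =>
    intro dq left s hfuel hdq hsum hmin
    exfalso
    have hleft : left = i + 1 := by omega
    have h0 : pvCost arr i i ≤ K := by rw [pvCost_self]; exact hK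
    exact hmin i (by omega) h0
  | succ fuel ih =>
    intro dq left s hfuel hdq hsum hmin
    have hli : left ≤ i := by omega
    have hhead : arr.getD (dq.headD 0) 0 = pvMax arr left (i + 1) :=
      pvHead_max arr hdq (by omega)
    have hcast : ((left : Nat) : Int) ≤ (i : Int) := by omega
    have hcost : arr.getD (dq.headD 0) 0 * ((i : Int) - (left : Int) + 1) - s =
        pvCost arr left i := by
      rw [hhead, hsum, pvCost]; ring
    rw [pvShrinkB]
    split
    · next hif =>
      obtain ⟨-, hgt⟩ := hif
      rw [hcost] at hgt
      have hdq' : pvDqInv arr (left + 1) (i + 1) (if dq.headD 0 = left then dq.tail else dq) :=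
        pvDqInv_dropOne arr hdq
      have hsum' : s - arr.getD left 0 = pvSum arr (left + 1) (i + 1) := by
        rw [hsum, pvSum_left arr (by omega : left < i + 1)]; ring
      have hmin' : ∀ a, a < left + 1 → ¬ (pvCost arr a i ≤ K) := by
        intro a ha
        by_cases hal : a < left
        · exact hmin a hal
        · have : a = left := by omega
          rw [this]; omega
      exact ih _ (left + 1) _ (by omega) hdq' hsum' hmin'
    · next hif =>
      have hle : pvCost arr left i ≤ K := by
        by_contra hgt
        rw [← hcost] at hgt
        exact hif ⟨hli, by omega⟩
      exact ⟨hdq, hsum, hmin, hle, hli⟩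

theorem pvStepB_inv (arr : List Int) (K : Int) (hK : 0 ≤ K) {m : Nat} {x : Int} {st : PvStB}
    (hx : x = arr.getD m 0) (h : pvInvB arr K m st) :
    pvInvB arr K (m + 1) (pvStepB arr K m x st) := by
  subst hx
  obtain ⟨hb, hl, hs, hdq, hmin⟩ := h
  have hdq1 : pvDqInv arr st.left (m + 1) (pvPush arr (arr.getD m 0) m st.dq) :=
    pvDqInv_push arr hdq hl
  have hs1 : st.s + arr.getD m 0 = pvSum arr st.left (m + 1) := by
    rw [hs, pvSum_right arr hl]
  have hmin1 : ∀ a, a < st.left → ¬ (pvCost arr a m ≤ K) := by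
    intro a ha hc
    have ham : a ≤ m - 1 := by omega
    have := pvCost_mono_right arr (a := a) (i := m - 1) ham
    rw [show m - 1 + 1 = m by omega] at this
    exact hmin a ha (le_trans this hc)
  have hsh := pvShrink_spec arr K hK m (m + 1 - st.left)
    (pvPush arr (arr.getD m 0) m st.dq) st.left (st.s + arr.getD m 0)
    (by omega) hdq1 hs1 hmin1
  obtain ⟨hdq', hs', hmin', hfeas', hle'⟩ := hsh
  unfold pvStepB
  simp only []
  refine ⟨?_, by simp only []; omega, by simp only []; exact hs', by simp only []; exact hdq',
    by simp only []; simpa using hmin'⟩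
  simp only []
  -- best' = max best (m + 1 - left') = pvRefc (m + 1)
  have hub : m + 1 - (pvShrinkB arr K m (m + 1 - st.left)
      (pvPush arr (arr.getD m 0) m st.dq) st.left (st.s + arr.getD m 0)).2.1 ≤
      pvRefc arr K (m + 1) :=
    pvRefc_bound arr K (m + 1) m _ (by omega) hle' hfeas'
  have hcle : pvRefc arr K m ≤ m := pvRefc_le arr K m
  rw [hb]
  by_cases hcm : pvCost arr (m - pvRefc arr K m) m ≤ K
  · have hrefc : pvRefc arr K (m + 1) = pvRefc arr K m + 1 := by
      rw [pvRefc, if_pos hcm]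
    have hlb : (pvShrinkB arr K m (m + 1 - st.left)
        (pvPush arr (arr.getD m 0) m st.dq) st.left (st.s + arr.getD m 0)).2.1 ≤
        m - pvRefc arr K m := by
      by_contra hgt
      exact hmin' (m - pvRefc arr K m) (by omega) hcm
    omega
  · have hrefc : pvRefc arr K (m + 1) = pvRefc arr K m := by
      rw [pvRefc, if_neg hcm]
    omega

theorem pvLoopA_refc (arr : List Int) (K : Int) (hK : 0 ≤ K) :
    ∀ (l : List Int) (m : Nat) (st : PvStA), arr.drop m = l → m ≤ arr.length →
    pvInvA arr K m st → (pvLoopA arr K l m st).window = pvRefc arr K arr.length := by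
  intro l
  induction l with
  | nil =>
    intro m st hdrop hm hinv
    have : arr.length ≤ m := by
      by_contra hc
      have := List.drop_eq_nil_iff.mp hdrop
      omega
    have hm' : m = arr.length := by omega
    rw [pvLoopA, ← hm']
    exact hinv.1
  | cons x rest ih =>
    intro m st hdrop hm hinv
    have hmlt : m < arr.length := by
      by_contra hc
      rw [List.drop_eq_nil_of_le (by omega)] at hdrop
      cases hdrop
    have hx : arr.getD m 0 = x := by
      have h2 : (List.drop m arr)[0]? = arr[m + 0]? := List.getElem?_drop
      rw [hdrop] at h2
      simp at h2
      simp [List.getD, ← h2]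
    have hrest : arr.drop (m + 1) = rest := by
      have : (arr.drop m).tail = rest := by rw [hdrop]; rfl
      simpa [List.tail_drop] using this
    rw [pvLoopA]
    exact ih (m + 1) _ hrest (by omega) (pvStepA_inv arr K hK hx.symm hinv)

theorem pvLoopB_refc (arr : List Int) (K : Int) (hK : 0 ≤ K) :
    ∀ (l : List Int) (m : Nat) (st : PvStB), arr.drop m = l → m ≤ arr.length →
    pvInvB arr K m st → (pvLoopB arr K l m st).best = pvRefc arr K arr.length := by
  intro l
  induction l with
  | nil =>
    intro m st hdrop hm hinv
    have : arr.length ≤ m := by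
      by_contra hc
      have := List.drop_eq_nil_iff.mp hdrop
      omega
    have hm' : m = arr.length := by omega
    rw [pvLoopB, ← hm']
    exact hinv.1
  | cons x rest ih =>
    intro m st hdrop hm hinv
    have hmlt : m < arr.length := by
      by_contra hc
      rw [List.drop_eq_nil_of_le (by omega)] at hdrop
      cases hdrop
    have hx : arr.getD m 0 = x := by
      have h2 : (List.drop m arr)[0]? = arr[m + 0]? := List.getElem?_drop
      rw [hdrop] at h2
      simp at h2
      simp [List.getD, ← h2]
    have hrest : arr.drop (m + 1) = rest := by
      have : (arr.drop m).tail = rest := by rw [hdrop]; rfl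
      simpa [List.tail_drop] using this
    rw [pvLoopB]
    exact ih (m + 1) _ hrest (by omega) (pvStepB_inv arr K hK hx.symm hinv)

theorem pvA_eq (arr : List Int) (K : Int) (hK : 0 ≤ K) :
    maxEqual arr K = ((pvRefc arr K arr.length : Nat) : Int) := by
  unfold maxEqual
  congr 1
  refine pvLoopA_refc arr K hK arr 0 _ rfl (by omega) ⟨rfl, rfl, by simp [pvSum], ?_⟩
  refine ⟨List.Pairwise.nil, by simp, ?_, List.Pairwise.nil⟩
  intro j hj1 hj2
  omega

theorem pvB_eq (arr : List Int) (K : Int) (hK : 0 ≤ K) :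
    maxEqual_alt arr K = ((pvRefc arr K arr.length : Nat) : Int) := by
  unfold maxEqual_alt
  congr 1
  refine pvLoopB_refc arr K hK arr 0 _ rfl (by omega)
    ⟨rfl, le_refl 0, by simp [pvSum], ?_, by intro a ha; simp at ha⟩
  refine ⟨List.Pairwise.nil, by simp, ?_, List.Pairwise.nil⟩
  intro j hj1 hj2
  omega

-- ===== VERDICT (by name: the statement is the Claim_ definition above) =====
theorem maxEqual_spec : Claim_equal_maxEqual := by
  intro arr K _hdom hpre
  unfold Spec_maxEqual
  rcases hpre with rfl | hK
  · rfl
  · rw [pvA_eq arr K hK, pvB_eq arr K hK]
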